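-- pv_equiv track=rewrite | github.com/tjamescouch/exactus | boolean_validate.py | _simplify_product
-- ===== SOURCE A (Python) =====
-- from typing import List, Tuple, Dict, Callable
--
-- def _simplify_product(inds: Tuple[int, ...], n_bits: int) -> Tuple[bool, Tuple[Tuple[int,int], ...]]:
--     """
--     inds: monomial indices in the expanded feature space:
--           [0..n_bits-1]  -> x_j
--           [n_bits..2n-1] -> ¬x_j  (encoded as 1 - x_j)
--     Returns:
--       (is_valid, literals)
--       where literals is a sorted tuple of (var_idx, polarity), polarity ∈ {+1 (x_j), -1 (¬x_j)}.
--       If the product contains both x_j and ¬x_j, it's a contradiction -> (False, ()).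
--       Repeated occurrences collapse (idempotence).
--     """
--     pos = set()
--     neg = set()
--     for t in inds:
--         if t < n_bits:
--             pos.add(t)
--         else:
--             neg.add(t - n_bits)
--     # contradiction?
--     if any(j in neg for j in pos):
--         return False, ()
--     # collapse repeats (idempotence) by using sets
--     lits = []
--     for j in sorted(pos):
--         lits.append((j, +1))
--     for j in sorted(neg):
--         lits.append((j, -1))
--     return True, tuple(lits)
-- ===== SOURCE B (Python) =====
-- def _simplify_product(inds, n_bits):
--     # sort-then-scan: normalize every index to a (var, polarity) literal, sort the
--     # literals by variable, then one adjacency scan deduplicates and detects a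
--     # contradiction (two literals on the same variable with opposite polarity).
--     lits = sorted(((t, 1) if t < n_bits else (t - n_bits, -1) for t in inds),
--                   key=lambda l: l[0])
--     out = []
--     for l in lits:
--         if out and out[-1][0] == l[0]:
--             if out[-1][1] != l[1]:
--                 return False, ()
--         else:
--             out.append(l)
--     return True, tuple([l for l in out if l[1] == 1] + [l for l in out if l[1] == -1])
-- ===== Notes on version B (the rewrite author's own statement) =====
-- stated objective: alternative
-- what changed: A maintains two hash sets while looping and then checks contradiction with a set-membership scan and concatenates two separately sorted passes; B never builds a set: it normalizes every index to a (var, polarity) literal, sorts the literal list by variable once, and a single adjacency scan over the sorted list both collapses repeats and detects a contradiction, after which two filters split positives from negatives.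
import Mathlib
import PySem

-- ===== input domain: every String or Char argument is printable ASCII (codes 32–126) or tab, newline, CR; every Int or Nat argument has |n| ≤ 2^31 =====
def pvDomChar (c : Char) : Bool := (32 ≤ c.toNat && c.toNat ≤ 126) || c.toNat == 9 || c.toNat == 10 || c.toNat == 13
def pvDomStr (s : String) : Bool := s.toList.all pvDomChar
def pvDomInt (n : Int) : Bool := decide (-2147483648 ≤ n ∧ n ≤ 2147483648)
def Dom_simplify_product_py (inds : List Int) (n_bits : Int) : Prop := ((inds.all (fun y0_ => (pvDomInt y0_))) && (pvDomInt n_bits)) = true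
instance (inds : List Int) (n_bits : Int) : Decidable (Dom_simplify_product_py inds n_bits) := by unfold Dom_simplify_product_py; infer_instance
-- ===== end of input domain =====

-- B replaces A's two hash sets + post-loop membership scan + two separate sorts by a
-- sort-then-scan algorithm: normalize to literals, sort once by variable, one adjacency
-- scan dedupes and detects contradictions (objective: alternative).

-- ===== PORT A =====
-- the loop body: 'if t < n_bits: pos.add(t) else: neg.add(t - n_bits)'
def pvStepA (n_bits : Int) (s : PySem.Set Int × PySem.Set Int) (t : Int) : PySem.Set Int × PySem.Set Int :=
  if t < n_bits then (PySem.Set.add s.1 t, s.2) else (s.1, PySem.Set.add s.2 (t - n_bits))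

def simplify_product_py (inds : List Int) (n_bits : Int) : Bool × (List (Int × Int)) :=
  let st := inds.foldl (pvStepA n_bits) (PySem.Set.empty, PySem.Set.empty)
  if st.1.any (fun j => PySem.Set.contains st.2 j) then (false, [])
  else
    let lits : List (Int × Int) := (PySem.List.sorted st.1 (fun x => x) false).foldl (fun acc j => acc ++ [(j, (1 : Int))]) []
    let lits := (PySem.List.sorted st.2 (fun x => x) false).foldl (fun acc j => acc ++ [(j, (-1 : Int))]) lits
    (true, lits)

-- ===== PORT B =====
-- '(t, 1) if t < n_bits else (t - n_bits, -1)'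
def pvNorm (n_bits : Int) (t : Int) : Int × Int :=
  if t < n_bits then (t, (1 : Int)) else (t - n_bits, (-1 : Int))

-- the 'for l in lits' adjacency scan of Source B ('return False, ()' = none)
def pvScanB (out : List (Int × Int)) : List (Int × Int) → Option (List (Int × Int))
  | [] => some out
  | l :: rest =>
    match out.getLast? with
    | some p =>
      if p.1 == l.1 then
        if p.2 != l.2 then none else pvScanB out rest
      else pvScanB (out ++ [l]) rest
    | none => pvScanB (out ++ [l]) rest

def simplify_product_py_alt (inds : List Int) (n_bits : Int) : Bool × (List (Int × Int)) :=
  let lits := PySem.List.sorted (inds.map (pvNorm n_bits)) (fun l => l.1) false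
  match pvScanB [] lits with
  | none => (false, [])
  | some out => (true, out.filter (fun l => l.2 == 1) ++ out.filter (fun l => l.2 == -1))

-- ===== PRECONDITION & SPEC =====
def Spec_simplify_product_py (inds : List Int) (n_bits : Int) (out : Bool × (List (Int × Int))) : Prop := out = simplify_product_py_alt inds n_bits
instance (inds : List Int) (n_bits : Int) (out : Bool × (List (Int × Int))) : Decidable (Spec_simplify_product_py inds n_bits out) := by unfold Spec_simplify_product_py; infer_instance

-- ===== CLAIM (what is proved, stated in full; the proofs are below) =====
def Claim_equal_simplify_product_py : Prop := ∀ (inds : List Int) (n_bits : Int), Dom_simplify_product_py inds n_bits → Spec_simplify_product_py inds n_bits (simplify_product_py inds n_bits)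

-- ===== LEMMAS AND PROOFS =====

-- A's fold state: membership in pos/neg is exactly presence of the normalized literal, and sets stay Nodup
lemma pvA_state (n_bits : Int) (inds : List Int) :
    ∀ s : PySem.Set Int × PySem.Set Int,
      (∀ v, v ∈ (inds.foldl (pvStepA n_bits) s).1 ↔ v ∈ s.1 ∨ (v, (1:Int)) ∈ inds.map (pvNorm n_bits)) ∧
      (∀ v, v ∈ (inds.foldl (pvStepA n_bits) s).2 ↔ v ∈ s.2 ∨ (v, (-1:Int)) ∈ inds.map (pvNorm n_bits)) ∧
      (s.1.Nodup → (inds.foldl (pvStepA n_bits) s).1.Nodup) ∧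
      (s.2.Nodup → (inds.foldl (pvStepA n_bits) s).2.Nodup) := by
  induction inds with
  | nil => intro s; simp
  | cons t rest ih =>
    intro s
    simp only [List.foldl_cons, List.map_cons, List.mem_cons]
    obtain ⟨ih1, ih2, ih3, ih4⟩ := ih (pvStepA n_bits s t)
    by_cases ht : t < n_bits
    · have hstep : pvStepA n_bits s t = (PySem.Set.add s.1 t, s.2) := by
        simp [pvStepA, ht]
      have hn : pvNorm n_bits t = (t, (1:Int)) := by simp [pvNorm, ht]
      refine ⟨?_, ?_, ?_, ?_⟩
      · intro v
        rw [ih1 v, hstep, hn]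
        constructor
        · rintro (hv | hv)
          · rcases (PySem.Set.mem_add _ _ _).mp hv with hv | rfl
            · exact Or.inl hv
            · exact Or.inr (Or.inl rfl)
          · exact Or.inr (Or.inr hv)
        · rintro (hv | hv | hv)
          · exact Or.inl ((PySem.Set.mem_add _ _ _).mpr (Or.inl hv))
          · obtain ⟨rfl, -⟩ := Prod.mk.inj hv.symm
            exact Or.inl ((PySem.Set.mem_add _ _ _).mpr (Or.inr rfl))
          · exact Or.inr hv
      · intro v
        rw [ih2 v, hstep, hn]
        constructor
        · rintro (hv | hv)
          · exact Or.inl hv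
          · exact Or.inr (Or.inr hv)
        · rintro (hv | hv | hv)
          · exact Or.inl hv
          · exact absurd (Prod.mk.inj hv.symm).2 (by norm_num)
          · exact Or.inr hv
      · intro hnd
        exact ih3 (by rw [hstep]; exact PySem.Set.nodup_add _ _ hnd)
      · intro hnd
        exact ih4 (by rw [hstep]; exact hnd)
    · have hstep : pvStepA n_bits s t = (s.1, PySem.Set.add s.2 (t - n_bits)) := by
        simp [pvStepA, ht]
      have hn : pvNorm n_bits t = (t - n_bits, (-1:Int)) := by simp [pvNorm, ht]
      refine ⟨?_, ?_, ?_, ?_⟩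
      · intro v
        rw [ih1 v, hstep, hn]
        constructor
        · rintro (hv | hv)
          · exact Or.inl hv
          · exact Or.inr (Or.inr hv)
        · rintro (hv | hv | hv)
          · exact Or.inl hv
          · exact absurd (Prod.mk.inj hv.symm).2 (by norm_num)
          · exact Or.inr hv
      · intro v
        rw [ih2 v, hstep, hn]
        constructor
        · rintro (hv | hv)
          · rcases (PySem.Set.mem_add _ _ _).mp hv with hv | rfl
            · exact Or.inl hv
            · exact Or.inr (Or.inl rfl)
          · exact Or.inr (Or.inr hv)
        · rintro (hv | hv | hv)
          · exact Or.inl ((PySem.Set.mem_add _ _ _).mpr (Or.inl hv))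
          · obtain ⟨rfl, -⟩ := Prod.mk.inj hv.symm
            exact Or.inl ((PySem.Set.mem_add _ _ _).mpr (Or.inr rfl))
          · exact Or.inr hv
      · intro hnd
        exact ih3 (by rw [hstep]; exact hnd)
      · intro hnd
        exact ih4 (by rw [hstep]; exact PySem.Set.nodup_add _ _ hnd)


-- the scan over a var-sorted list, generalized accumulator
lemma pvScan_main :
    ∀ (lits : List (Int × Int)) (p : Int × Int) (acc : List (Int × Int)),
      lits.Pairwise (fun a b => a.1 ≤ b.1) →
      (∀ l ∈ lits, p.1 ≤ l.1) →
      (pvScanB (acc ++ [p]) lits = none ↔ ∃ a ∈ p :: lits, ∃ b ∈ p :: lits, a.1 = b.1 ∧ a.2 ≠ b.2) ∧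
      (∀ out, pvScanB (acc ++ [p]) lits = some out →
        ∃ tl, out = acc ++ p :: tl ∧ (p :: tl).Pairwise (fun a b => a.1 < b.1) ∧
          (∀ x, x ∈ p :: tl ↔ x ∈ p :: lits)) := by
  intro lits
  induction lits with
  | nil =>
    intro p acc _ _
    constructor
    · simp [pvScanB]
    · intro out hout
      simp only [pvScanB, Option.some.injEq] at hout
      exact ⟨[], by simpa using hout.symm, by simp, by simp⟩
  | cons l rest ih =>
    intro p acc hsort hle
    rcases List.pairwise_cons.mp hsort with ⟨hl, hrest⟩
    have hglast : (acc ++ [p]).getLast? = some p := by simp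
    by_cases hpl : p.1 = l.1
    · by_cases hpol : p.2 = l.2
      · have hlp : l = p := Prod.ext hpl.symm hpol.symm
        have hred : pvScanB (acc ++ [p]) (l :: rest) = pvScanB (acc ++ [p]) rest := by
          rw [pvScanB, hglast]
          simp [hpl, hpol]
        obtain ⟨ihn, ihs⟩ := ih p acc hrest (by
          intro b hb; rw [hpl]; exact hl b hb)
        subst hlp
        constructor
        · rw [hred, ihn]
          constructor <;>
            · rintro ⟨a, ha, b, hb, hab⟩
              refine ⟨a, ?_, b, ?_, hab⟩ <;> simp_all
        · intro out hout
          rw [hred] at hout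
          obtain ⟨tl, h1, h2, h3⟩ := ihs out hout
          refine ⟨tl, h1, h2, ?_⟩
          intro x
          rw [h3 x]
          simp
      · have hred : pvScanB (acc ++ [p]) (l :: rest) = none := by
          rw [pvScanB, hglast]
          simp only [beq_iff_eq, hpl, if_true, bne_iff_ne, ne_eq, hpol,
            not_false_eq_true, if_true]
        constructor
        · rw [hred]
          simp only [true_iff]
          exact ⟨p, by simp, l, by simp, hpl, hpol⟩
        · intro out hout
          rw [hred] at hout
          exact absurd hout (by simp)
    · have hplt : p.1 < l.1 := lt_of_le_of_ne (hle l (by simp)) hpl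
      have hred : pvScanB (acc ++ [p]) (l :: rest) = pvScanB ((acc ++ [p]) ++ [l]) rest := by
        rw [pvScanB, hglast]
        simp [hpl]
      obtain ⟨ihn, ihs⟩ := ih l (acc ++ [p]) hrest hl
      have hplt' : ∀ x ∈ l :: rest, p.1 < x.1 := by
        intro x hx
        rcases List.mem_cons.mp hx with rfl | hx
        · exact hplt
        · exact lt_of_lt_of_le hplt (hl x hx)
      constructor
      · rw [hred, ihn]
        constructor
        · rintro ⟨a, ha, b, hb, hab⟩
          exact ⟨a, List.mem_cons_of_mem _ ha, b, List.mem_cons_of_mem _ hb, hab⟩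
        · rintro ⟨a, ha, b, hb, h1, h2⟩
          rcases List.mem_cons.mp ha with h | ha'
          · subst h
            rcases List.mem_cons.mp hb with h' | hb'
            · subst h'; exact absurd rfl h2
            · exact absurd h1 (ne_of_lt (hplt' b hb'))
          · rcases List.mem_cons.mp hb with h' | hb'
            · subst h'
              exact absurd h1.symm (ne_of_lt (hplt' a ha'))
            · exact ⟨a, ha', b, hb', h1, h2⟩
      · intro out hout
        rw [hred] at hout
        obtain ⟨tl, h1, h2, h3⟩ := ihs out hout
        refine ⟨l :: tl, by simpa using h1, ?_, ?_⟩
        · refine List.pairwise_cons.mpr ⟨?_, h2⟩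
          intro x hx
          exact hplt' x ((h3 x).mp hx)
        · intro x
          simp only [List.mem_cons]
          rw [← List.mem_cons, h3 x, List.mem_cons]


lemma pvScan_top (lits : List (Int × Int)) (h : lits.Pairwise (fun a b => a.1 ≤ b.1)) :
    (pvScanB [] lits = none ↔ ∃ a ∈ lits, ∃ b ∈ lits, a.1 = b.1 ∧ a.2 ≠ b.2) ∧
    (∀ out, pvScanB [] lits = some out →
      out.Pairwise (fun a b => a.1 < b.1) ∧ (∀ x, x ∈ out ↔ x ∈ lits)) := by
  cases lits with
  | nil =>
    constructor
    · simp [pvScanB]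
    · intro out hout
      simp only [pvScanB, Option.some.injEq] at hout
      subst hout
      simp
  | cons l rest =>
    rcases List.pairwise_cons.mp h with ⟨hl, hrest⟩
    have hred : pvScanB [] (l :: rest) = pvScanB ([] ++ [l]) rest := by
      rw [pvScanB]
      rfl
    obtain ⟨ihn, ihs⟩ := pvScan_main rest l [] hrest hl
    constructor
    · rw [hred, ihn]
    · intro out hout
      rw [hred] at hout
      obtain ⟨tl, h1, h2, h3⟩ := ihs out hout
      simp only [List.nil_append] at h1
      subst h1
      exact ⟨h2, h3⟩


lemma pvReconstruct (c : Int) (l : List (Int × Int)) (h : ∀ x ∈ l, x.2 = c) :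
    (l.map Prod.fst).map (fun j => (j, c)) = l := by
  induction l with
  | nil => rfl
  | cons x xs ih =>
    simp only [List.map_cons]
    have hx := h x (by simp)
    have : (x.1, c) = x := by rw [← hx]
    rw [this, ih (fun y hy => h y (by simp [hy]))]

lemma pvNormSnd (n_bits : Int) (inds : List Int) :
    ∀ x ∈ inds.map (pvNorm n_bits), x.2 = 1 ∨ x.2 = -1 := by
  intro x hx
  obtain ⟨t, _, rfl⟩ := List.mem_map.mp hx
  unfold pvNorm; split <;> simp

lemma pvEta (x : Int × Int) (c : Int) (h : x.2 = c) : (x.1, c) = x := by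
  cases x; simp_all

-- ===== VERDICT (by name: the statement is the Claim_ definition above) =====
theorem simplify_product_py_spec : Claim_equal_simplify_product_py := by
  intro inds n_bits _dom
  unfold Spec_simplify_product_py
  simp only [simplify_product_py, simplify_product_py_alt]
  set M := inds.map (pvNorm n_bits) with hM
  set lits := PySem.List.sorted M (fun l => l.1) false with hlits
  set st := inds.foldl (pvStepA n_bits) (PySem.Set.empty, PySem.Set.empty) with hst
  have hsort : lits.Pairwise (fun a b => a.1 ≤ b.1) := PySem.List.sorted_pairwise M (fun l => l.1)
  have hmemL : ∀ x : Int × Int, x ∈ lits ↔ x ∈ M := by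
    intro x; rw [hlits]; exact PySem.List.mem_sorted M (fun l => l.1) false x
  obtain ⟨hnone, hsome⟩ := pvScan_top lits hsort
  obtain ⟨hmem1, hmem2, hnd1, hnd2⟩ := pvA_state n_bits inds (PySem.Set.empty, PySem.Set.empty)
  have hm1 : ∀ v, v ∈ st.1 ↔ (v, (1:Int)) ∈ M := by
    intro v; rw [hst, hM, hmem1 v]; simp [PySem.Set.empty]
  have hm2 : ∀ v, v ∈ st.2 ↔ (v, (-1:Int)) ∈ M := by
    intro v; rw [hst, hM, hmem2 v]; simp [PySem.Set.empty]
  have hnd1' : st.1.Nodup := by rw [hst]; exact hnd1 (by simp [PySem.Set.empty])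
  have hnd2' : st.2.Nodup := by rw [hst]; exact hnd2 (by simp [PySem.Set.empty])
  have hcontr : (st.1.any (fun j => PySem.Set.contains st.2 j) = true) ↔
      (∃ a ∈ lits, ∃ b ∈ lits, a.1 = b.1 ∧ a.2 ≠ b.2) := by
    constructor
    · intro hany
      obtain ⟨v, hv1, hv2⟩ := List.any_eq_true.mp hany
      have hv2' : v ∈ st.2 := (PySem.Set.contains_iff _ _).mp hv2
      exact ⟨(v, 1), (hmemL _).mpr ((hm1 v).mp hv1),
             (v, -1), (hmemL _).mpr ((hm2 v).mp hv2'), rfl, by norm_num⟩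
    · rintro ⟨a, ha, b, hb, h1, h2⟩
      have ha2 := pvNormSnd n_bits inds a ((hmemL a).mp ha)
      have hb2 := pvNormSnd n_bits inds b ((hmemL b).mp hb)
      have hkey : (a.1, (1:Int)) ∈ M ∧ (a.1, (-1:Int)) ∈ M := by
        rcases ha2 with ha2 | ha2 <;> rcases hb2 with hb2 | hb2
        · exact absurd (ha2.trans hb2.symm) h2
        · refine ⟨?_, ?_⟩
          · rw [pvEta a 1 ha2]; exact (hmemL a).mp ha
          · rw [h1, pvEta b (-1) hb2]; exact (hmemL b).mp hb
        · refine ⟨?_, ?_⟩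
          · rw [h1, pvEta b 1 hb2]; exact (hmemL b).mp hb
          · rw [pvEta a (-1) ha2]; exact (hmemL a).mp ha
        · exact absurd (ha2.trans hb2.symm) h2
      exact List.any_eq_true.mpr ⟨a.1, (hm1 _).mpr hkey.1,
        (PySem.Set.contains_iff _ _).mpr ((hm2 _).mpr hkey.2)⟩
  rcases hcase : pvScanB [] lits with _ | out
  · have hany : st.1.any (fun j => PySem.Set.contains st.2 j) = true :=
      hcontr.mpr (hnone.mp hcase)
    rw [if_pos hany]
  · obtain ⟨hpw, hmemO⟩ := hsome out hcase
    have hany : st.1.any (fun j => PySem.Set.contains st.2 j) = false := by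
      rw [Bool.eq_false_iff]
      intro h
      rw [hnone.mpr (hcontr.mp h)] at hcase
      simp at hcase
    rw [if_neg (by rw [hany]; exact Bool.false_ne_true)]
    simp only [PySem.List.foldl_append_singleton_eq_map, List.nil_append]
    have hpos : (PySem.List.sorted st.1 (fun x => x) false).map (fun j => (j, (1:Int))) =
        out.filter (fun l => l.2 == 1) := by
      set pf := out.filter (fun l => l.2 == (1:Int)) with hpf
      have hpf2 : ∀ x ∈ pf, x.2 = 1 := by
        intro x hx
        simpa using (List.mem_filter.mp hx).2
      have hpfmem : ∀ v, v ∈ pf.map Prod.fst ↔ v ∈ st.1 := by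
        intro v
        rw [hm1]
        constructor
        · intro hv
          obtain ⟨x, hx, rfl⟩ := List.mem_map.mp hv
          have hx2 := hpf2 x hx
          rw [pvEta x 1 hx2]
          exact (hmemL x).mp ((hmemO x).mp (List.mem_filter.mp hx).1)
        · intro hv
          exact List.mem_map.mpr ⟨(v, 1),
            List.mem_filter.mpr ⟨(hmemO _).mpr ((hmemL _).mpr hv), by simp⟩, rfl⟩
      have hpfpw : (pf.map Prod.fst).Pairwise (· < ·) := by
        rw [List.pairwise_map]
        exact List.Pairwise.sublist List.filter_sublist hpw
      have hndpf : (pf.map Prod.fst).Nodup := hpfpw.imp ne_of_lt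
      have hperm : (pf.map Prod.fst).Perm st.1 :=
        (List.perm_ext_iff_of_nodup hndpf hnd1').mpr hpfmem
      rw [PySem.List.sorted_eq_of_perm_of_pairwise_lt st.1 (pf.map Prod.fst) (fun x => x) hperm hpfpw,
        pvReconstruct 1 pf hpf2]
    have hneg : (PySem.List.sorted st.2 (fun x => x) false).map (fun j => (j, (-1:Int))) =
        out.filter (fun l => l.2 == -1) := by
      set nf := out.filter (fun l => l.2 == (-1:Int)) with hnf
      have hnf2 : ∀ x ∈ nf, x.2 = -1 := by
        intro x hx
        simpa using (List.mem_filter.mp hx).2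
      have hnfmem : ∀ v, v ∈ nf.map Prod.fst ↔ v ∈ st.2 := by
        intro v
        rw [hm2]
        constructor
        · intro hv
          obtain ⟨x, hx, rfl⟩ := List.mem_map.mp hv
          have hx2 := hnf2 x hx
          rw [pvEta x (-1) hx2]
          exact (hmemL x).mp ((hmemO x).mp (List.mem_filter.mp hx).1)
        · intro hv
          exact List.mem_map.mpr ⟨(v, -1),
            List.mem_filter.mpr ⟨(hmemO _).mpr ((hmemL _).mpr hv), by simp⟩, rfl⟩
      have hnfpw : (nf.map Prod.fst).Pairwise (· < ·) := by
        rw [List.pairwise_map]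
        exact List.Pairwise.sublist List.filter_sublist hpw
      have hndnf : (nf.map Prod.fst).Nodup := hnfpw.imp ne_of_lt
      have hperm : (nf.map Prod.fst).Perm st.2 :=
        (List.perm_ext_iff_of_nodup hndnf hnd2').mpr hnfmem
      rw [PySem.List.sorted_eq_of_perm_of_pairwise_lt st.2 (nf.map Prod.fst) (fun x => x) hperm hnfpw,
        pvReconstruct (-1) nf hnf2]
    rw [hpos, hneg]
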